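-- pv_equiv track=rewrite | github.com/incremen/pyfuncs_to_chars | optimize.py | inverse_digit_offset
-- ===== SOURCE A (Python) =====
-- MAX_OFFSET = 2
--
-- def inverse_digit_offset(target, base_len):
--     """Invert target = digits(parent) + base_len - offset, using smallest parent with d digits."""
--     for offset in range(MAX_OFFSET + 1):
--         d = target + offset - base_len
--         if d < 1 or d > 6:
--             continue
--         parent = 1 if d == 1 else 10 ** (d - 1)
--         if len(str(parent)) == d:
--             return parent, offset
--     return None
-- ===== SOURCE B (Python) =====
-- def inverse_digit_offset(target, base_len):
--     """Invert target = digits(parent) + base_len - offset: direct arithmetic, no scan."""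
--     base = target - base_len
--     if 1 <= base <= 6:
--         return (1 if base == 1 else 10 ** (base - 1), 0)
--     if -1 <= base <= 0:
--         return (1, 1 - base)
--     return None
-- ===== Notes on version B (the rewrite author's own statement) =====
-- stated objective: simpler
-- what changed: Replaces the 3-iteration offset scan with a direct arithmetic inversion on base = target - base_len, dropping the always-true len(str(parent)) == d check.
import Mathlib
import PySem

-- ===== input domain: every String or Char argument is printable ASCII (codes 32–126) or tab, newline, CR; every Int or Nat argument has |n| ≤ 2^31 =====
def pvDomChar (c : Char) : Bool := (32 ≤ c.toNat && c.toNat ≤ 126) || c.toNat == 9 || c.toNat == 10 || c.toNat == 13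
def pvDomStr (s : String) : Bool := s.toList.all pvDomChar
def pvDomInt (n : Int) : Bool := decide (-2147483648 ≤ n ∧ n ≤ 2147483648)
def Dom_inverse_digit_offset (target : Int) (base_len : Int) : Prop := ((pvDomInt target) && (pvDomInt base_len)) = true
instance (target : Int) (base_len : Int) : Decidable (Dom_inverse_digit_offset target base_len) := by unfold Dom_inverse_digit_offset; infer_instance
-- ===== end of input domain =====

-- B replaces A's 3-iteration offset scan by a direct arithmetic inversion (simpler).

-- ===== PORT A =====
-- the for-loop over range(MAX_OFFSET + 1) with early return, step for step
def idoLoop (target : Int) (base_len : Int) : List Int → Option (Int × Int)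
  | [] => none
  | offset :: rest =>
    let d := target + offset - base_len
    if d < 1 ∨ d > 6 then idoLoop target base_len rest
    else
      let parent : Int := if d = 1 then 1 else 10 ^ (d - 1).toNat
      if PySem.Str.len (PySem.Int.toStr parent) = d then (parent, offset)
      else idoLoop target base_len rest

def inverse_digit_offset (target : Int) (base_len : Int) : Option (Int × Int) :=
  idoLoop target base_len (PySem.List.pyRange 0 (2 + 1) 1)

-- ===== PORT B =====
def inverse_digit_offset_alt (target : Int) (base_len : Int) : Option (Int × Int) :=
  let base := target - base_len
  if 1 ≤ base ∧ base ≤ 6 then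
    (((if base = 1 then (1 : Int) else 10 ^ (base - 1).toNat), (0 : Int)) : Int × Int)
  else if -1 ≤ base ∧ base ≤ 0 then
    ((1 : Int), 1 - base)
  else
    none

-- ===== PRECONDITION & SPEC =====
def Spec_inverse_digit_offset (target : Int) (base_len : Int) (out : Option (Int × Int)) : Prop := out = inverse_digit_offset_alt target base_len
instance (target : Int) (base_len : Int) (out : Option (Int × Int)) : Decidable (Spec_inverse_digit_offset target base_len out) := by unfold Spec_inverse_digit_offset; infer_instance

-- ===== CLAIM (what is proved, stated in full; the proofs are below) =====
def Claim_equal_inverse_digit_offset : Prop := ∀ (target : Int) (base_len : Int), Dom_inverse_digit_offset target base_len → Spec_inverse_digit_offset target base_len (inverse_digit_offset target base_len)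

-- ===== LEMMAS AND PROOFS =====

-- both sides depend only on base = target - base_len; state the equivalence over base
theorem ido_eq (target base_len : Int) :
    inverse_digit_offset target base_len = inverse_digit_offset_alt target base_len := by
  have hr : PySem.List.pyRange 0 (2 + 1) 1 = [0, 1, 2] := by decide
  unfold inverse_digit_offset inverse_digit_offset_alt
  rw [hr]
  simp only [idoLoop]
  by_cases h1 : 1 ≤ target - base_len ∧ target - base_len ≤ 6
  · rw [if_pos h1]
    rw [if_neg (by omega : ¬ (target + 0 - base_len < 1 ∨ target + 0 - base_len > 6))]
    rcases (by omega : target - base_len = 1 ∨ target - base_len = 2 ∨ target - base_len = 3 ∨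
        target - base_len = 4 ∨ target - base_len = 5 ∨ target - base_len = 6) with h|h|h|h|h|h <;>
      [ (have e : target + 0 - base_len = 1 := by omega);
        (have e : target + 0 - base_len = 2 := by omega);
        (have e : target + 0 - base_len = 3 := by omega);
        (have e : target + 0 - base_len = 4 := by omega);
        (have e : target + 0 - base_len = 5 := by omega);
        (have e : target + 0 - base_len = 6 := by omega) ] <;>
      simp only [e, h] <;> norm_num <;> exact fun hC => absurd (by decide) hC
  · rw [if_neg h1]
    by_cases h2 : -1 ≤ target - base_len ∧ target - base_len ≤ 0
    · rw [if_pos h2]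
      rw [if_pos (by omega : (target + 0 - base_len < 1 ∨ target + 0 - base_len > 6))]
      by_cases h0 : target - base_len = 0
      · rw [if_neg (by omega : ¬ (target + 1 - base_len < 1 ∨ target + 1 - base_len > 6))]
        have e : target + 1 - base_len = 1 := by omega
        simp only [e]
        norm_num
        rw [if_pos (by decide : (PySem.Int.toChars 1).length = 1)]
        rw [show 1 - (target - base_len) = 1 from by omega]
      · rw [if_pos (by omega : (target + 1 - base_len < 1 ∨ target + 1 - base_len > 6))]
        rw [if_neg (by omega : ¬ (target + 2 - base_len < 1 ∨ target + 2 - base_len > 6))]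
        have e : target + 2 - base_len = 1 := by omega
        simp only [e]
        norm_num
        exact ⟨by decide, by omega⟩
    · rw [if_neg h2]
      rw [if_pos (by omega : (target + 0 - base_len < 1 ∨ target + 0 - base_len > 6))]
      rw [if_pos (by omega : (target + 1 - base_len < 1 ∨ target + 1 - base_len > 6))]
      rw [if_pos (by omega : (target + 2 - base_len < 1 ∨ target + 2 - base_len > 6))]

-- ===== VERDICT (by name: the statement is the Claim_ definition above) =====
theorem inverse_digit_offset_spec : Claim_equal_inverse_digit_offset := by
  intro target base_len _
  exact ido_eq target base_len
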